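-- pv_equiv track=rewrite | github.com/tmoiynmwg/advent-of-code | 2020/day16.py | check_intervals
-- ===== SOURCE A (Python) =====
-- def in_interval(num, interval):
-- 	return num >= interval[0] and num <= interval[1]
--
-- def check_intervals(fmatr, field_rules, tickets):
-- 	for ticket in tickets:
-- 		for i, num in enumerate(ticket):
-- 			for key, val in field_rules.items():
-- 				for interval in val:
-- 					if in_interval(num, interval):
-- 						break
-- 				else:
-- 					fmatr[i][key] = False
--
-- 	return fmatr
-- ===== SOURCE B (Python) =====
-- def check_intervals(fmatr, field_rules, tickets):
--     # Memoized re-implementation: each distinct ticket value is classified against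
--     # the rules once; the list of rule keys it fails is cached and replayed.
--     # Mutates fmatr in place, like the original (equivalence is about the return value).
--     cache = {}
--     for ticket in tickets:
--         for i, num in enumerate(ticket):
--             fails = cache.get(num)
--             if fails is None:
--                 fails = [key for key, val in field_rules.items()
--                          if not any(lo <= num <= hi for lo, hi in val)]
--                 cache[num] = fails
--             for key in fails:
--                 fmatr[i][key] = False
--     return fmatr
-- ===== Notes on version B (the rewrite author's own statement) =====
-- stated objective: alternative
-- what changed: B precomputes, per distinct ticket value, the list of rule keys whose intervals it all fails (memoized in a dict built on the fly), then just replays that key list into the row, instead of rescanning every rule's interval list for every occurrence of every value.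
import Mathlib
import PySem

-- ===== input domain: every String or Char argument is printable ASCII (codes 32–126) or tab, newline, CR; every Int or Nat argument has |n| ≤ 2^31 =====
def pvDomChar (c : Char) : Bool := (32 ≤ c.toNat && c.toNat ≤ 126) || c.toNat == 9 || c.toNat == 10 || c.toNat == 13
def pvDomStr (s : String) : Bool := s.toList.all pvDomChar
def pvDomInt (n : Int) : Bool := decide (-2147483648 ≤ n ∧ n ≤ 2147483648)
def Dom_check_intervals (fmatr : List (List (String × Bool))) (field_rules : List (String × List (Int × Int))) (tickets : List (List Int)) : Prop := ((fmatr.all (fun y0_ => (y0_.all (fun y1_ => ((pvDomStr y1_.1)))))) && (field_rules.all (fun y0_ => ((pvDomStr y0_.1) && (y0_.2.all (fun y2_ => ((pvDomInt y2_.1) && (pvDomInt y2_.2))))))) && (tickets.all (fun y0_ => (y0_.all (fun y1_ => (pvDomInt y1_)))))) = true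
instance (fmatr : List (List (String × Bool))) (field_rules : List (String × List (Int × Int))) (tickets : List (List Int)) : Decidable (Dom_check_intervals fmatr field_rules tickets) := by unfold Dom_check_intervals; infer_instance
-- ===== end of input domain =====

-- B replaces the per-occurrence rescan of every rule's interval list by a memoized
-- per-distinct-value list of failing keys ("alternative" objective); equivalence is
-- about the return value (both Pythons also mutate fmatr in place identically).

-- ===== PORT A =====

-- helper in_interval(num, interval)
def in_interval (num : Int) (interval : Int × Int) : Bool :=
  decide (num ≥ interval.1) && decide (num ≤ interval.2)

-- the for/else scan over the interval list: true iff some interval matched (the break)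
def aIntervalScan (num : Int) : List (Int × Int) → Bool
  | [] => false
  | iv :: rest => if in_interval num iv then true else aIntervalScan num rest

-- fmatr[i][key] = False on row dict (overwrite first match in place, else append);
-- both Pythons perform this exact primitive
def dictSetFalse (key : String) : List (String × Bool) → List (String × Bool)
  | [] => [(key, false)]
  | (k, v) :: rest => if k == key then (k, false) :: rest else (k, v) :: dictSetFalse key rest

-- enumerate indices are ≥ 0, so .toNat is exact here (no negative index can occur)
def check_intervals (fmatr : List (List (String × Bool))) (field_rules : List (String × List (Int × Int))) (tickets : List (List Int)) : List (List (String × Bool)) :=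
  tickets.foldl (fun fm ticket =>
    (PySem.List.enumerate ticket).foldl (fun fm inum =>
      field_rules.foldl (fun fm kv =>
        if aIntervalScan inum.2 kv.2 then fm
        else fm.modify inum.1.toNat (dictSetFalse kv.1)) fm) fm) fmatr

-- ===== PORT B =====

-- the comprehension: keys whose rule num fails every interval of
def failKeys (num : Int) (field_rules : List (String × List (Int × Int))) : List String :=
  (field_rules.filter (fun kv => ! kv.2.any (fun iv => decide (iv.1 ≤ num) && decide (num ≤ iv.2)))).map (·.1)

-- state is (fmatr, cache); cache.get(num) memoizes failKeys
def check_intervals_alt (fmatr : List (List (String × Bool))) (field_rules : List (String × List (Int × Int))) (tickets : List (List Int)) : List (List (String × Bool)) :=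
  (tickets.foldl (fun (st : List (List (String × Bool)) × PySem.Dict Int (List String)) ticket =>
    (PySem.List.enumerate ticket).foldl (fun st inum =>
      let fc : List String × PySem.Dict Int (List String) :=
        match st.2.get? inum.2 with
        | some ks => (ks, st.2)
        | none => (failKeys inum.2 field_rules, st.2.insert inum.2 (failKeys inum.2 field_rules))
      (fc.1.foldl (fun fm key => fm.modify inum.1.toNat (dictSetFalse key)) st.1, fc.2)) st)
    (fmatr, (PySem.Dict.empty : PySem.Dict Int (List String)))).1

-- ===== PRECONDITION & SPEC =====
-- A raises IndexError exactly when some ticket value at a position ≥ len(fmatr) fails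
-- some rule (only then is fmatr[i] touched); Pre_ admits exactly the returning inputs.
def Pre_check_intervals (fmatr : List (List (String × Bool))) (field_rules : List (String × List (Int × Int))) (tickets : List (List Int)) : Prop :=
  (tickets.all (fun t => (t.drop fmatr.length).all (fun num =>
    field_rules.all (fun kv => kv.2.any (fun iv =>
      decide (iv.1 ≤ num) && decide (num ≤ iv.2)))))) = true
instance (fmatr : List (List (String × Bool))) (field_rules : List (String × List (Int × Int))) (tickets : List (List Int)) : Decidable (Pre_check_intervals fmatr field_rules tickets) := by unfold Pre_check_intervals; infer_instance

def pvWitness_check_intervals : (List (List (String × Bool))) × (List (String × List (Int × Int))) × List (List Int) :=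
  ([[("a", true), ("b", true)]], [("a", [(0, 3)]), ("b", [(2, 9)])], [[5], [2]])

def Spec_check_intervals (fmatr : List (List (String × Bool))) (field_rules : List (String × List (Int × Int))) (tickets : List (List Int)) (out : List (List (String × Bool))) : Prop := out = check_intervals_alt fmatr field_rules tickets
instance (fmatr : List (List (String × Bool))) (field_rules : List (String × List (Int × Int))) (tickets : List (List Int)) (out : List (List (String × Bool))) : Decidable (Spec_check_intervals fmatr field_rules tickets out) := by unfold Spec_check_intervals; infer_instance

-- ===== CLAIM (what is proved, stated in full; the proofs are below) =====
def Claim_equal_check_intervals : Prop := ∀ (fmatr : List (List (String × Bool))) (field_rules : List (String × List (Int × Int))) (tickets : List (List Int)), Dom_check_intervals fmatr field_rules tickets → Pre_check_intervals fmatr field_rules tickets → Spec_check_intervals fmatr field_rules tickets (check_intervals fmatr field_rules tickets)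

-- ===== LEMMAS AND PROOFS =====

-- the break/else scan is the any-test of B's comprehension
theorem aIntervalScan_eq_any (num : Int) (ivs : List (Int × Int)) :
    aIntervalScan num ivs = ivs.any (fun iv => decide (iv.1 ≤ num) && decide (num ≤ iv.2)) := by
  induction ivs with
  | nil => rfl
  | cons iv rest ih =>
    simp only [aIntervalScan, in_interval, List.any_cons, ge_iff_le]
    by_cases h : (decide (iv.1 ≤ num) && decide (num ≤ iv.2)) = true
    · simp [h]
    · simp [h, ih]

theorem failKeys_cons (num : Int) (kv : String × List (Int × Int)) (rest : List (String × List (Int × Int))) :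
    failKeys num (kv :: rest)
      = if aIntervalScan num kv.2 then failKeys num rest else kv.1 :: failKeys num rest := by
  rw [aIntervalScan_eq_any]
  rcases h : kv.2.any (fun iv => decide (iv.1 ≤ num) && decide (num ≤ iv.2)) with _ | _ <;>
    simp [failKeys, h]

-- A's inner rule loop equals replaying failKeys
theorem inner_eq (num : Int) (rules : List (String × List (Int × Int))) :
    ∀ (fm : List (List (String × Bool))) (i : Nat),
    rules.foldl (fun fm kv =>
        if aIntervalScan num kv.2 then fm else fm.modify i (dictSetFalse kv.1)) fm
      = (failKeys num rules).foldl (fun fm key => fm.modify i (dictSetFalse key)) fm := by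
  induction rules with
  | nil => intro fm i; rfl
  | cons kv rest ih =>
    intro fm i
    rw [List.foldl_cons, failKeys_cons]
    by_cases h : aIntervalScan num kv.2 = true
    · rw [if_pos h, if_pos h, ih]
    · rw [if_neg h, if_neg h, List.foldl_cons, ih]

-- cache invariant: every cached list is failKeys of its key
def CacheInv (field_rules : List (String × List (Int × Int))) (c : PySem.Dict Int (List String)) : Prop :=
  ∀ (k : Int) (v : List String), c.get? k = some v → v = failKeys k field_rules

theorem stepL (field_rules : List (String × List (Int × Int)))
    (l : List (Int × Int)) :
    ∀ (fm : List (List (String × Bool))) (c : PySem.Dict Int (List String)),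
    CacheInv field_rules c →
    ∃ c',
    (l.foldl (fun st inum =>
        let fc : List String × PySem.Dict Int (List String) :=
          match st.2.get? inum.2 with
          | some ks => (ks, st.2)
          | none => (failKeys inum.2 field_rules, st.2.insert inum.2 (failKeys inum.2 field_rules))
        ((fc.1.foldl (fun fm key => fm.modify inum.1.toNat (dictSetFalse key)) st.1, fc.2) : List (List (String × Bool)) × PySem.Dict Int (List String))) (fm, c))
      = (l.foldl (fun fm inum =>
          field_rules.foldl (fun fm kv =>
            if aIntervalScan inum.2 kv.2 then fm
            else fm.modify inum.1.toNat (dictSetFalse kv.1)) fm) fm, c')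
    ∧ CacheInv field_rules c' := by
  induction l with
  | nil => intro fm c hc; exact ⟨c, rfl, hc⟩
  | cons inum rest ih =>
    intro fm c hc
    simp only [List.foldl_cons]
    rw [inner_eq]
    rcases hg : c.get? inum.2 with _ | ks
    · have hinv : CacheInv field_rules (c.insert inum.2 (failKeys inum.2 field_rules)) := by
        intro k v hkv
        rw [PySem.Dict.get?_insert] at hkv
        by_cases hk : k = inum.2
        · simp [hk] at hkv; simp [hk, ← hkv]
        · simp [hk] at hkv; exact hc k v hkv
      obtain ⟨c', h1, h2⟩ :=
        ih (List.foldl (fun fm key => fm.modify inum.1.toNat (dictSetFalse key)) fm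
              (failKeys inum.2 field_rules))
           (c.insert inum.2 (failKeys inum.2 field_rules)) hinv
      refine ⟨c', ?_, h2⟩
      exact h1
    · have hks := hc inum.2 ks hg
      obtain ⟨c', h1, h2⟩ :=
        ih (List.foldl (fun fm key => fm.modify inum.1.toNat (dictSetFalse key)) fm ks) c hc
      refine ⟨c', ?_, h2⟩
      rw [← hks]
      exact h1

theorem ticketsL (field_rules : List (String × List (Int × Int)))
    (ts : List (List Int)) :
    ∀ (fm : List (List (String × Bool))) (c : PySem.Dict Int (List String)),
    CacheInv field_rules c →
    (ts.foldl (fun st ticket =>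
      (PySem.List.enumerate ticket).foldl (fun st inum =>
        let fc : List String × PySem.Dict Int (List String) :=
          match st.2.get? inum.2 with
          | some ks => (ks, st.2)
          | none => (failKeys inum.2 field_rules, st.2.insert inum.2 (failKeys inum.2 field_rules))
        ((fc.1.foldl (fun fm key => fm.modify inum.1.toNat (dictSetFalse key)) st.1, fc.2) : List (List (String × Bool)) × PySem.Dict Int (List String))) st) (fm, c)).1
      = ts.foldl (fun fm ticket =>
          (PySem.List.enumerate ticket).foldl (fun fm inum =>
            field_rules.foldl (fun fm kv =>
              if aIntervalScan inum.2 kv.2 then fm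
              else fm.modify inum.1.toNat (dictSetFalse kv.1)) fm) fm) fm := by
  induction ts with
  | nil => intro fm c hc; rfl
  | cons t rest ih =>
    intro fm c hc
    rw [List.foldl_cons, List.foldl_cons]
    obtain ⟨c', h1, h2⟩ := stepL field_rules (PySem.List.enumerate t) fm c hc
    rw [h1]
    exact ih _ c' h2

-- ===== VERDICT (by name: the statement is the Claim_ definition above) =====
theorem check_intervals_spec : Claim_equal_check_intervals := by
  intro fmatr field_rules tickets _ _
  unfold Spec_check_intervals check_intervals check_intervals_alt
  rw [ticketsL field_rules tickets fmatr PySem.Dict.empty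
      (by intro k v h; simp [PySem.Dict.get?_empty] at h)]
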